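-- pv_equiv track=rewrite | github.com/FireFly4ik/allMireaCodes | Mirea/Алгоритмы и структуры данных/Практика 1.2/1.4.py | f
-- ===== SOURCE A (Python) =====
-- def f(arr):
--     hashArr = [0] * (len(arr) - 1)
--     for i in range(len(arr) - 2, -1, -1):
--         for j in range(i, len(hashArr)):
--             if arr[j] > arr[j + 1]:
--                 if j + 1 == len(arr) - 1:
--                     hashArr[i] = 1
--                     break
--                 hashArr[i] += hashArr[j + 1] + 1
--                 break
--     return hashArr + [0]
-- ===== SOURCE B (Python) =====
-- def f(arr):
--     if not arr:
--         return []
--     out = [0]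
--     for i in range(len(arr) - 2, -1, -1):
--         out.append(out[-1] + 1 if arr[i] > arr[i + 1] else out[-1])
--     out.reverse()
--     return out
-- ===== Notes on version B (the rewrite author's own statement) =====
-- stated objective: faster
-- what changed: Replaces the inner forward scan for the first descent by a single backward pass that reuses the already-computed value of position i+1 (res[i] = res[i+1]+1 on a descent, else res[i+1]), so each position costs O(1).
-- intended difference: On the empty input list A returns a spurious one-element output consisting of the sentinel zero appended to an empty table, while B returns an empty list, the intended per-position output of length len(arr). — e.g. on f([]): A returns [0], B returns []
import Mathlib
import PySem

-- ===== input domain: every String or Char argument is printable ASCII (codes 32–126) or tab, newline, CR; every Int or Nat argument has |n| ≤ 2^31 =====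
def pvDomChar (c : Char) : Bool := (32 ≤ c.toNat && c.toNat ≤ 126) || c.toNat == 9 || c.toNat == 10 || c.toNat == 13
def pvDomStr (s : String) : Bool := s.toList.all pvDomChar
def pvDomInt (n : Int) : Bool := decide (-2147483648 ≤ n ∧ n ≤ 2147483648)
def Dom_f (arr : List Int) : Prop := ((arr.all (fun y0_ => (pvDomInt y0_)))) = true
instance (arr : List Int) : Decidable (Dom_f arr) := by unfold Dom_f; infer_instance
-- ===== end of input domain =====

-- B replaces A's quadratic forward scans by one linear backward pass; on the empty list B returns the empty list where A returns a spurious one-element output.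

-- ===== PORT A =====
-- inner 'for j in range(i, len(hashArr))' with break (indices are always in range, so getD/setD defaults are never used)
def fInner (arr : List Int) (i : Int) (h : List Int) : List Int → List Int
  | [] => h
  | j :: js =>
    if PySem.List.pyGetD arr j 0 > PySem.List.pyGetD arr (j + 1) 0 then
      if j + 1 = (arr.length : Int) - 1 then
        PySem.List.pySetD h i 1
      else
        PySem.List.pySetD h i (PySem.List.pyGetD h i 0 + PySem.List.pyGetD h (j + 1) 0 + 1)
    else fInner arr i h js

def f (arr : List Int) : List Int :=
  let h0 : List Int := List.replicate (arr.length - 1) 0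
  let h1 := (PySem.List.pyRange ((arr.length : Int) - 2) (-1) (-1)).foldl
      (fun h i => fInner arr i h (PySem.List.pyRange i (h.length : Int) 1)) h0
  h1 ++ [0]

-- ===== PORT B =====
def f_alt (arr : List Int) : List Int :=
  if arr = [] then []
  else
    let out : List Int := [0]
    let out := (PySem.List.pyRange ((arr.length : Int) - 2) (-1) (-1)).foldl
      (fun out i =>
        out ++ [if PySem.List.pyGetD arr i 0 > PySem.List.pyGetD arr (i + 1) 0
                then PySem.List.pyGetD out (-1) 0 + 1
                else PySem.List.pyGetD out (-1) 0]) out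
    out.reverse

-- ===== PRECONDITION & SPEC =====
-- On the empty input list A returns a spurious one-element output (the sentinel zero appended to an
-- empty table) while B returns an empty list, the intended per-position output of length len(arr).
def D_f (arr : List Int) : Prop := arr = []
instance (arr : List Int) : Decidable (D_f arr) := by unfold D_f; infer_instance

def Spec_f (arr : List Int) (out : List Int) : Prop := ¬ D_f arr → out = f_alt arr
instance (arr : List Int) (out : List Int) : Decidable (Spec_f arr out) := by unfold Spec_f; infer_instance

def pvDiffWitness_f : List Int := []
def pvDiffWitnessOut_f : (List Int) × (List Int) := ([0], [])

-- ===== CLAIM (what is proved, stated in full; the proofs are below) =====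
def Claim_unchanged_f : Prop := ∀ (arr : List Int), Dom_f arr → Spec_f arr (f arr)
def Claim_changed_f : Prop := Dom_f (pvDiffWitness_f) ∧ D_f (pvDiffWitness_f) ∧ f (pvDiffWitness_f) = pvDiffWitnessOut_f.1 ∧ f_alt (pvDiffWitness_f) = pvDiffWitnessOut_f.2 ∧ pvDiffWitnessOut_f.1 ≠ pvDiffWitnessOut_f.2
def Claim_exact_f : Prop := ∀ (arr : List Int), Dom_f arr → D_f arr → f arr ≠ f_alt arr

-- ===== LEMMAS AND PROOFS =====

-- the value both programs compute at position i (backward recurrence)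
def vA (arr : List Int) (i : Nat) : Int :=
  if _h : i + 1 < arr.length then
    (if arr.getD i 0 > arr.getD (i + 1) 0 then vA arr (i + 1) + 1 else vA arr (i + 1))
  else 0
termination_by arr.length - i

-- first descent index ≥ i (what A's inner scan finds)
def fdA (arr : List Int) (i : Nat) : Option Nat :=
  if _h : i + 1 < arr.length then
    (if arr.getD i 0 > arr.getD (i + 1) 0 then some i else fdA arr (i + 1))
  else none
termination_by arr.length - i

theorem fd_ge (arr : List Int) (i j : Nat) (h : fdA arr i = some j) : i ≤ j ∧ j + 1 < arr.length := by
  fun_induction fdA arr i generalizing j with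
  | case1 i hlt hgt => simp at h; omega
  | case2 i hlt hgt ih => have := ih _ h; omega
  | case3 i hlt => simp at h

theorem v_fd (arr : List Int) (i : Nat) :
    vA arr i = match fdA arr i with
      | none => 0
      | some k => if k + 2 = arr.length then 1 else vA arr (k + 1) + 1 := by
  fun_induction fdA arr i with
  | case1 i hlt hgt =>
      rw [vA]; simp only [hlt, hgt, if_true, dif_pos]
      rw [vA]
      by_cases h2 : i + 2 = arr.length
      · have : ¬ (i + 1 + 1 < arr.length) := by omega
        simp [h2]
      · simp [h2]
  | case2 i hlt hgt ih =>
      rw [vA]; simp only [hlt, hgt, if_false, dif_pos]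
      exact ih
  | case3 i hlt =>
      rw [vA]; simp [hlt]

theorem inner_spec (arr : List Int) (i : Nat) (h : List Int) (j : Nat) :
    fInner arr (i : Int) h (PySem.List.pyRange (j : Int) ((arr.length : Int) - 1) 1) =
      match fdA arr j with
      | none => h
      | some k => h.set i (if k + 2 = arr.length then 1 else h.getD i 0 + h.getD (k + 1) 0 + 1) := by
  have hcast : ∀ m : Nat, ((m : Int) + 1) = ((m + 1 : Nat) : Int) := by intro m; push_cast; ring
  fun_induction fdA arr j with
  | case1 j hlt hgt =>
      rw [PySem.List.pyRange_one_cons (by omega : (j : Int) < (arr.length : Int) - 1)]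
      simp only [fInner, hcast, PySem.List.pyGetD_natCast, PySem.List.pySetD_natCast]
      have hgt' : arr.getD j 0 > arr.getD (j + 1) 0 := hgt
      rw [if_pos hgt']
      by_cases h2 : j + 2 = arr.length
      · rw [if_pos (by omega : ((j + 1 : Nat) : Int) = (arr.length : Int) - 1), if_pos h2]
      · rw [if_neg (by omega : ¬ ((j + 1 : Nat) : Int) = (arr.length : Int) - 1), if_neg h2]
  | case2 j hlt hgt ih =>
      rw [PySem.List.pyRange_one_cons (by omega : (j : Int) < (arr.length : Int) - 1)]
      simp only [fInner, hcast, PySem.List.pyGetD_natCast]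
      rw [if_neg (by simpa using hgt)]
      exact ih
  | case3 j hlt =>
      rw [PySem.List.pyRange_one_eq_nil (by omega : (arr.length : Int) - 1 ≤ (j : Int))]
      simp [fInner]

theorem getD_set_eq (l : List Int) (i k : Nat) (v : Int) :
    (l.set i v).getD k 0 = if i = k ∧ i < l.length then v else l.getD k 0 := by
  simp only [List.getD_eq_getElem?_getD, List.getElem?_set]
  split_ifs with h1 h2 h3 <;> simp_all <;> omega

-- step h i, for i a Nat below n-1, sets position i to vA arr i (or leaves it 0), given the invariants
theorem step_spec (arr : List Int) (i : Nat) (h : List Int) (hi : i + 1 < arr.length)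
    (hlen : h.length = arr.length - 1)
    (hhigh : ∀ k, i < k → k + 1 < arr.length → h.getD k 0 = vA arr k)
    (hlow : ∀ k, k ≤ i → h.getD k 0 = 0) :
    fInner arr (i : Int) h (PySem.List.pyRange (i : Int) ((h.length : Int)) 1) =
      h.set i (vA arr i) ∧ (h.set i (vA arr i)).length = arr.length - 1 ∧
      (∀ k, i ≤ k → k + 1 < arr.length → (h.set i (vA arr i)).getD k 0 = vA arr k) ∧
      (∀ k, k < i → (h.set i (vA arr i)).getD k 0 = 0) := by
  have hlen' : ((h.length : Int)) = (arr.length : Int) - 1 := by omega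
  rw [hlen', inner_spec arr i h i]
  have hv := v_fd arr i
  rcases hfd : fdA arr i with _ | k
  · rw [hfd] at hv; simp only at hv
    have hset : h.set i (vA arr i) = h := by
      apply List.ext_getElem (by simp)
      intro m hm hm2
      rw [← List.getD_eq_getElem (h.set i (vA arr i)) 0 hm, ← List.getD_eq_getElem h 0 hm2,
          getD_set_eq]
      split_ifs with he
      · rw [hv, ← hlow i (le_refl i), he.1]
        rw [List.getD_eq_getElem h _ hm2, List.getD_eq_getElem h _ hm2]
      · rfl
    rw [hset]
    refine ⟨rfl, by simpa using hlen, ?_, ?_⟩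
    · intro k hik hk
      rcases Nat.eq_or_lt_of_le hik with he | hl
      · rw [← he, hlow i (le_refl i), hv]
      · exact hhigh k hl hk
    · intro k hk; exact hlow k (by omega)
  · rw [hfd] at hv; simp only at hv
    obtain ⟨hik, hk1⟩ := fd_ge arr i k hfd
    dsimp only
    have hval : (if k + 2 = arr.length then (1:Int) else h.getD i 0 + h.getD (k + 1) 0 + 1) = vA arr i := by
      by_cases h2 : k + 2 = arr.length
      · rw [if_pos h2, hv, if_pos h2]
      · rw [if_neg h2, hv, if_neg h2, hlow i (le_refl i), hhigh (k + 1) (by omega) (by omega)]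
        ring
    rw [hval]
    refine ⟨rfl, by simpa using hlen, ?_, ?_⟩
    · intro m him hm
      rw [getD_set_eq]
      split_ifs with he
      · rw [← he.1]
      · have : i < m := by omega
        exact hhigh m this hm
    · intro m hm
      rw [getD_set_eq]
      rw [if_neg (by omega)]
      exact hlow m (by omega)

theorem outer_inv (arr : List Int) (i : Nat) (hi : i + 1 < arr.length) (h : List Int)
    (hlen : h.length = arr.length - 1)
    (hhigh : ∀ k, i < k → k + 1 < arr.length → h.getD k 0 = vA arr k)
    (hlow : ∀ k, k ≤ i → h.getD k 0 = 0) :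
    (PySem.List.pyRange (i : Int) (-1) (-1)).foldl
        (fun h i => fInner arr i h (PySem.List.pyRange i (h.length : Int) 1)) h
      = (List.range (arr.length - 1)).map (vA arr) := by
  induction i generalizing h with
  | zero =>
      simp only [Nat.cast_zero]
      rw [PySem.List.pyRange_neg_one_cons (by omega : (-1 : Int) < 0),
          PySem.List.pyRange_neg_one_eq_nil (by omega : (0 : Int) - 1 ≤ -1)]
      simp only [List.foldl_cons, List.foldl_nil]
      obtain ⟨hstep, hlen', hhigh', _⟩ := step_spec arr 0 h hi hlen hhigh hlow
      rw [show ((0 : Int)) = ((0 : Nat) : Int) by simp]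
      rw [hstep]
      apply List.ext_getElem (by simp [hlen'])
      intro m hm1 hm2
      have hmlt : m + 1 < arr.length := by simp at hm2; omega
      have := hhigh' m (by omega) hmlt
      rw [List.getD_eq_getElem _ 0 hm1] at this
      simp [this]
  | succ i ih =>
      have hcast : ((i + 1 : Nat) : Int) = (i : Int) + 1 := by push_cast; ring
      rw [hcast, PySem.List.pyRange_neg_one_cons (by omega : (-1 : Int) < (i : Int) + 1)]
      simp only [List.foldl_cons]
      rw [show ((i : Int) + 1 - 1) = (i : Int) by ring, show ((i : Int) + 1) = ((i + 1 : Nat) : Int) by omega]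
      obtain ⟨hstep, hlen', hhigh', hlow'⟩ := step_spec arr (i + 1) h hi hlen hhigh hlow
      rw [hstep]
      exact ih (by omega) _ (by simpa using hlen') (fun k hk hk1 => hhigh' k (by omega) hk1)
        (fun k hk => hlow' k (by omega))

theorem fA_eq (arr : List Int) (hne : arr ≠ []) :
    f arr = (List.range (arr.length - 1)).map (vA arr) ++ [0] := by
  have hn : 1 ≤ arr.length := by cases arr <;> simp_all
  unfold f
  dsimp only
  rcases Nat.lt_or_ge arr.length 2 with h2 | h2
  · have h1 : arr.length = 1 := by omega
    rw [h1, PySem.List.pyRange_neg_one_eq_nil (by norm_num)]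
    simp
  · rw [show ((arr.length : Int) - 2) = ((arr.length - 2 : Nat) : Int) by omega]
    rw [outer_inv arr (arr.length - 2) (by omega) _ (by simp)
      (fun k hk hk1 => by omega)
      (fun k hk => by
        rw [List.getD_eq_getElem _ 0 (by simp; omega : k < (List.replicate (arr.length - 1) (0:Int)).length)]
        simp)]

theorem B_inv (arr : List Int) (i : Nat) (hi : i ≤ arr.length - 1) (hn : 1 ≤ arr.length) :
    (PySem.List.pyRange ((i : Int) - 1) (-1) (-1)).foldl
      (fun out i =>
        out ++ [if PySem.List.pyGetD arr i 0 > PySem.List.pyGetD arr (i + 1) 0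
                then PySem.List.pyGetD out (-1) 0 + 1
                else PySem.List.pyGetD out (-1) 0])
      (((List.range' i (arr.length - i)).map (vA arr)).reverse)
      = ((List.range' 0 arr.length).map (vA arr)).reverse := by
  induction i with
  | zero =>
      rw [PySem.List.pyRange_neg_one_eq_nil (by norm_num)]
      simp
  | succ i ih =>
      rw [show (((i + 1 : Nat) : Int) - 1) = (i : Int) by push_cast; ring,
          PySem.List.pyRange_neg_one_cons (by omega : (-1 : Int) < (i : Int))]
      simp only [List.foldl_cons]
      have hsplit : List.range' (i + 1) (arr.length - (i + 1)) = (i + 1) :: List.range' (i + 2) (arr.length - (i + 2)) := by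
        rw [show arr.length - (i + 1) = (arr.length - (i + 2)) + 1 by omega, List.range'_succ]
      have hout : (((List.range' (i + 1) (arr.length - (i + 1))).map (vA arr)).reverse)
          = ((List.range' (i + 2) (arr.length - (i + 2))).map (vA arr)).reverse ++ [vA arr (i + 1)] := by
        rw [hsplit]; simp
      rw [hout]
      have hlast : PySem.List.pyGetD (((List.range' (i + 2) (arr.length - (i + 2))).map (vA arr)).reverse ++ [vA arr (i + 1)]) (-1) 0 = vA arr (i + 1) :=
        PySem.List.pyGetD_neg_one_append_singleton _ _ _
      rw [hlast]
      simp only [PySem.List.pyGetD_natCast, show ((i : Int) + 1) = ((i + 1 : Nat) : Int) by push_cast; ring]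
      have hv : (if arr.getD (i + 1) 0 < arr.getD i 0 then vA arr (i + 1) + 1 else vA arr (i + 1)) = vA arr i := by
        have : i + 1 < arr.length := by omega
        conv_rhs => rw [vA]
        simp [this, gt_iff_lt]
      have hstep : (((List.range' (i + 2) (arr.length - (i + 2))).map (vA arr)).reverse ++ [vA arr (i + 1)]) ++ [if arr.getD (i + 1) 0 < arr.getD i 0 then vA arr (i + 1) + 1 else vA arr (i + 1)]
          = ((List.range' i (arr.length - i)).map (vA arr)).reverse := by
        rw [hv, ← hout, show List.range' i (arr.length - i) = i :: List.range' (i + 1) (arr.length - (i + 1)) by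
          rw [show arr.length - i = (arr.length - (i + 1)) + 1 by omega, List.range'_succ]]
        simp
      rw [hstep]
      exact ih (by omega)

theorem fB_eq (arr : List Int) (hne : arr ≠ []) :
    f_alt arr = (List.range (arr.length - 1)).map (vA arr) ++ [0] := by
  have hn : 1 ≤ arr.length := by cases arr <;> simp_all
  unfold f_alt
  rw [if_neg hne]
  dsimp only
  have h0 : ([(0 : Int)]) = ((List.range' (arr.length - 1) (arr.length - (arr.length - 1))).map (vA arr)).reverse := by
    rw [show arr.length - (arr.length - 1) = 1 by omega]
    simp [List.range'_one]
    rw [vA]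
    simp [show ¬ (arr.length - 1 + 1 < arr.length) by omega]
  rw [h0, show ((arr.length : Int) - 2) = (((arr.length - 1 : Nat) : Int) - 1) by omega,
      B_inv arr (arr.length - 1) (le_refl _) hn]
  rw [List.reverse_reverse, show List.range' 0 arr.length = List.range arr.length by rw [List.range_eq_range'],
      show arr.length = (arr.length - 1) + 1 by omega, List.range_succ]
  simp

-- ===== VERDICT (by name: the statement is the Claim_ definition above) =====
theorem f_spec : Claim_unchanged_f := by
  intro arr _ hD
  have hne : arr ≠ [] := by simpa [D_f] using hD
  rw [fA_eq arr hne, fB_eq arr hne]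

theorem f_changed : Claim_changed_f := by unfold Claim_changed_f; decide

theorem f_tight : Claim_exact_f := by
  intro arr _ hD
  subst hD; decide
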